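-- pv_equiv track=rewrite | github.com/maks-mishin/algorithms-datastructures | level0/tasks/line_analysis.py | is_template_line
-- ===== SOURCE A (Python) =====
-- def is_template_line(line: str) -> bool:
--     template = ''
--     for ch in line[1:]:
--         if ch == '*':
--             template += ch
--             break
--         template += ch
--
--     # construct the source line by template
--     constructed_line = '*'
--     while len(constructed_line) < len(line):
--         constructed_line += template
--     return constructed_line == line
-- ===== SOURCE B (Python) =====
-- def is_template_line(line: str) -> bool:
--     # Single pass: compare each character against the periodic template in place,
--     # instead of repeatedly concatenating the template into a new string.
--     if not line or line[0] != '*':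
--         return False
--     rest = line[1:]
--     if not rest:
--         return True
--     star = rest.find('*')
--     p = star + 1 if star != -1 else len(rest)
--     if len(rest) % p != 0:
--         return False
--     return all(rest[j] == rest[j % p] for j in range(len(rest)))
-- ===== Notes on version B (the rewrite author's own statement) =====
-- stated objective: faster
-- what changed: Instead of repeatedly concatenating the template into a constructed string and comparing whole strings, B computes the template length once and does a single index pass checking each character against the periodic position, plus a length-divisibility check.
import Mathlib
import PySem

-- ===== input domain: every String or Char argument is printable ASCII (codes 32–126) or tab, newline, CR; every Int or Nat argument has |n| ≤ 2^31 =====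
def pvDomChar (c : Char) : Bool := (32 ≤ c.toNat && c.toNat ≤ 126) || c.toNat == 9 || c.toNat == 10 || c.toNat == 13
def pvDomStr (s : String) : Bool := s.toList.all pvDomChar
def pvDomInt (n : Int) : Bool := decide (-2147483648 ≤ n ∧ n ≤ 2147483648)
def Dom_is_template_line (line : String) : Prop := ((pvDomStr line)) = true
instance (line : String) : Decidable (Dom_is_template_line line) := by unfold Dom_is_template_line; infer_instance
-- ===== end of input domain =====

-- B changes the algorithm: one index pass over the line against the periodic template,
-- instead of A's rebuild-the-line-by-repeated-concatenation; same result everywhere.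

-- ===== PORT A =====
-- template = '' ; for ch in line[1:]: append ch, break on '*'
def templA : List Char → List Char
  | [] => []
  | ch :: rest => if ch = '*' then [ch] else ch :: templA rest

-- while len(constructed) < len(line): constructed += template
-- (fuel = len(line) is always enough: each iteration that runs appends a nonempty template)
def buildA (n : Nat) (t : List Char) : Nat → List Char → List Char
  | 0, c => c
  | fuel + 1, c => if c.length < n then buildA n t fuel (c ++ t) else c

def is_template_line (line : String) : Bool :=
  let l := line.toList
  let template := templA (l.drop 1)
  let constructed := buildA l.length template l.length ['*']
  constructed == l

-- ===== PORT B =====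
-- star = rest.find('*'); p = star+1 if found else len(rest)
def pB : List Char → Nat
  | [] => 0
  | ch :: r => if ch = '*' then 1 else 1 + pB r

def is_template_line_alt (line : String) : Bool :=
  match line.toList with
  | [] => false
  | c :: rest =>
    if c ≠ '*' then false
    else if rest.isEmpty then true
    else
      let p := pB rest
      if rest.length % p ≠ 0 then false
      else (List.range rest.length).all (fun j => rest.getD j ' ' == rest.getD (j % p) ' ')

-- ===== PRECONDITION & SPEC =====
def Spec_is_template_line (line : String) (out : Bool) : Prop := out = is_template_line_alt line
instance (line : String) (out : Bool) : Decidable (Spec_is_template_line line out) := by unfold Spec_is_template_line; infer_instance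

-- ===== CLAIM (what is proved, stated in full; the proofs are below) =====
def Claim_equal_is_template_line : Prop := ∀ (line : String), Dom_is_template_line line → Spec_is_template_line line (is_template_line line)

-- ===== LEMMAS AND PROOFS =====

-- the while-loop of A, without fuel (only used in proofs)
def gLoop (n : Nat) (t : List Char) (c : List Char) : List Char :=
  if _h : c.length < n ∧ t ≠ [] then gLoop n t (c ++ t) else c
  termination_by n - c.length
  decreasing_by
    have : 0 < t.length := List.length_pos_iff.mpr _h.2
    simp only [List.length_append]; omega

theorem pB_pos (r : List Char) (h : r ≠ []) : 0 < pB r := by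
  cases r with
  | nil => exact absurd rfl h
  | cons a l => simp only [pB]; split <;> omega

theorem pB_le (r : List Char) : pB r ≤ r.length := by
  induction r with
  | nil => simp [pB]
  | cons a l ih => simp only [pB, List.length_cons]; split <;> omega

theorem templA_eq_take (r : List Char) : templA r = r.take (pB r) := by
  induction r with
  | nil => simp [templA, pB]
  | cons a l ih =>
    simp only [templA, pB]
    split
    · simp [*]
    · rw [Nat.add_comm, List.take_succ_cons, ih]

theorem templA_len (r : List Char) : (templA r).length = pB r := by
  rw [templA_eq_take, List.length_take]
  exact Nat.min_eq_left (pB_le r)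

theorem buildA_nil (n : Nat) : ∀ fuel c, buildA n [] fuel c = c := by
  intro fuel
  induction fuel with
  | zero => intro c; rw [buildA]
  | succ m ih => intro c; rw [buildA]; split <;> simp [ih]

theorem gLoop_nil (n : Nat) (c : List Char) : gLoop n [] c = c := by
  rw [gLoop]; simp

theorem buildA_eq_gLoop (n : Nat) (t : List Char) :
    ∀ fuel c, n ≤ c.length + fuel → buildA n t fuel c = gLoop n t c := by
  by_cases ht : t = []
  · subst ht; intro fuel c _; rw [buildA_nil, gLoop_nil]
  · have hpos : 0 < t.length := List.length_pos_iff.mpr ht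
    intro fuel
    induction fuel with
    | zero =>
      intro c h
      rw [buildA, gLoop]
      have : ¬ (c.length < n ∧ t ≠ []) := by intro ⟨h1, _⟩; omega
      simp [this]
    | succ m ih =>
      intro c h
      rw [buildA, gLoop]
      by_cases hlt : c.length < n
      · simp only [hlt, ht, ne_eq, not_false_eq_true, and_self, if_true, dif_pos]
        exact ih (c ++ t) (by simp only [List.length_append]; omega)
      · have : ¬ (c.length < n ∧ t ≠ []) := by intro ⟨h1, _⟩; exact hlt h1
        simp [hlt]

theorem gLoop_exists (n : Nat) (t : List Char) :
    ∀ c, ∃ k, gLoop n t c = c ++ (List.replicate k t).flatten := by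
  intro c
  by_cases ht : t = []
  · subst ht; exact ⟨0, by rw [gLoop_nil]; simp⟩
  · have hpos : 0 < t.length := List.length_pos_iff.mpr ht
    induction hm : n - c.length using Nat.strong_induction_on generalizing c with
    | _ m ih =>
      rw [gLoop]
      by_cases hlt : c.length < n
      · simp only [hlt, ht, ne_eq, not_false_eq_true, and_self, dif_pos]
        obtain ⟨k, hk⟩ := ih (n - (c ++ t).length)
          (by simp only [List.length_append]; omega) (c ++ t) rfl
        exact ⟨k + 1, by rw [hk]; simp [List.replicate_succ, List.append_assoc]⟩
      · exact ⟨0, by simp [hlt]⟩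

theorem flat_len (t : List Char) (k : Nat) :
    ((List.replicate k t).flatten).length = k * t.length := by
  induction k with
  | zero => simp
  | succ m ih => simp [List.replicate_succ, ih, Nat.succ_mul]; ring

theorem flat_getD (t : List Char) (d : Char) :
    ∀ k j, j < k * t.length →
      ((List.replicate k t).flatten).getD j d = t.getD (j % t.length) d := by
  intro k
  induction k with
  | zero => intro j h; omega
  | succ m ih =>
    intro j h
    rw [List.replicate_succ, List.flatten_cons]
    by_cases hj : j < t.length
    · rw [List.getD_append _ _ _ _ hj, Nat.mod_eq_of_lt hj]
    · have hle : t.length ≤ j := Nat.le_of_not_lt hj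
      have hmul : (m + 1) * t.length = m * t.length + t.length := Nat.succ_mul m t.length
      have hb : j - t.length < m * t.length := by omega
      rw [List.getD_append_right _ _ _ _ hle, ih (j - t.length) hb,
        ← Nat.mod_eq_sub_mod hle]

theorem gLoop_complete (t : List Char) (ht : t ≠ []) :
    ∀ q (c : List Char), gLoop (c.length + q * t.length) t c = c ++ (List.replicate q t).flatten := by
  intro q
  have hpos : 0 < t.length := List.length_pos_iff.mpr ht
  induction q with
  | zero =>
    intro c
    rw [gLoop]
    simp
  | succ m ih =>
    intro c
    rw [gLoop]
    have hml : (m + 1) * t.length = m * t.length + t.length := by ring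
    have hlt : c.length < c.length + (m + 1) * t.length := by omega
    simp only [hlt, ht, ne_eq, not_false_eq_true, and_self, dif_pos]
    have heq : c.length + (m + 1) * t.length = (c ++ t).length + m * t.length := by
      simp only [List.length_append]; omega
    rw [heq, ih (c ++ t)]
    simp [List.replicate_succ, List.append_assoc]

-- take agrees with the original list on indices below the cut
theorem getD_take (r : List Char) (p i : Nat) (d : Char) (hi : i < p) (hr : i < r.length) :
    (r.take p).getD i d = r.getD i d := by
  rw [List.getD_eq_getElem _ _ (by simp [List.length_take]; omega),
      List.getD_eq_getElem _ _ hr, List.getElem_take]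

-- characterization of A's loop result in the main (nonempty rest, leading '*') case
theorem main_iff (rest : List Char) (hne : rest ≠ []) :
    (gLoop (rest.length + 1) (templA rest) ['*'] = '*' :: rest ↔
      (rest.length % pB rest = 0 ∧
        ∀ j < rest.length, rest.getD j ' ' = rest.getD (j % pB rest) ' ')) := by
  set t := templA rest with htdef
  have hp : t.length = pB rest := templA_len rest
  have hppos : 0 < pB rest := pB_pos rest hne
  have htpos : 0 < t.length := by omega
  have htne : t ≠ [] := List.length_pos_iff.mp htpos
  have htake : t = rest.take (pB rest) := templA_eq_take rest
  constructor
  · intro heq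
    obtain ⟨k, hk⟩ := gLoop_exists (rest.length + 1) t ['*']
    rw [hk] at heq
    have hrest : rest = (List.replicate k t).flatten := by
      rw [List.singleton_append] at heq
      exact ((List.cons_inj_right _).mp heq).symm
    have hlen : rest.length = k * t.length := by rw [hrest, flat_len]
    have hkpos : 0 < k := by
      rcases Nat.eq_zero_or_pos k with h0 | h
      · exfalso; rw [h0] at hlen; simp at hlen; exact hne hlen
      · exact h
    refine ⟨by rw [hlen, ← hp]; simp [Nat.mul_mod_left], ?_⟩
    intro j hj
    have hjlt : j < k * t.length := by omega
    have hjm : j % t.length < k * t.length :=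
      lt_of_lt_of_le (Nat.mod_lt _ htpos) (Nat.le_mul_of_pos_left _ hkpos)
    have e1 : rest.getD j ' ' = t.getD (j % t.length) ' ' := by
      conv_lhs => rw [hrest]
      exact flat_getD t ' ' k j hjlt
    have e2 : rest.getD (j % pB rest) ' ' = t.getD (j % t.length) ' ' := by
      conv_lhs => rw [← hp, hrest]
      rw [flat_getD t ' ' k _ hjm, Nat.mod_mod_of_dvd _ (dvd_refl _)]
    rw [e1, e2]
  · rintro ⟨hmod, hper⟩
    set p := pB rest with hpdef
    set q := rest.length / p with hqdef
    have hq : rest.length = q * p := by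
      rw [hqdef]; exact (Nat.div_mul_cancel (Nat.dvd_of_mod_eq_zero hmod)).symm
    have hrest : rest = (List.replicate q t).flatten := by
      apply List.ext_getElem
      · rw [flat_len, hp]; exact hq
      · intro j h1 h2
        rw [← List.getD_eq_getElem _ ' ' h1, ← List.getD_eq_getElem _ ' ' h2]
        have hjlt : j < q * t.length := by rw [hp]; omega
        rw [flat_getD t ' ' q j hjlt, hp]
        have hjp : j % p < p := Nat.mod_lt _ hppos
        have hple : p ≤ rest.length := pB_le rest
        rw [htake, getD_take rest p (j % p) ' ' hjp (by omega)]
        exact hper j h1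
    have hn : rest.length + 1 = (['*'] : List Char).length + q * t.length := by
      simp [hp]; omega
    rw [hn, gLoop_complete t htne q ['*'], ← hrest, List.singleton_append]

-- ===== VERDICT (by name: the statement is the Claim_ definition above) =====
theorem is_template_line_spec : Claim_equal_is_template_line := by
  intro line _
  unfold Spec_is_template_line is_template_line is_template_line_alt
  cases hl : line.toList with
  | nil => simp [buildA]
  | cons c rest =>
    cases rest with
    | nil =>
      by_cases hc : c = '*'
      · simp [buildA, hc]
      · simp [buildA, hc]
        exact Ne.symm hc
    | cons r rs =>
      set REST : List Char := r :: rs with hR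
      have hne : REST ≠ [] := by simp [hR]
      have hA : buildA (c :: REST).length (templA ((c :: REST).drop 1)) (c :: REST).length ['*']
          = gLoop (REST.length + 1) (templA REST) ['*'] := by
        rw [List.drop_one, List.tail_cons]
        have : (c :: REST).length = REST.length + 1 := by simp
        rw [this]
        exact buildA_eq_gLoop _ _ _ _ (by simp)
      simp only [List.drop_succ_cons, List.drop_zero] at hA ⊢
      by_cases hc : c = '*'
      · subst hc
        rw [hA, Bool.eq_iff_iff, beq_iff_eq, main_iff REST hne]
        have hie : REST.isEmpty = false := by simp [hR]
        by_cases hmod : REST.length % pB REST = 0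
        · simp [hie, hmod, List.all_eq_true, List.mem_range]
        · simp [hie, hmod]
      · simp only [ne_eq, hc, not_false_eq_true, if_true]
        rw [hA]
        obtain ⟨k, hk⟩ := gLoop_exists (REST.length + 1) (templA REST) ['*']
        rw [hk, List.singleton_append]
        simp only [beq_eq_false_iff_ne, ne_eq]
        intro h
        injection h with h1 _
        exact hc h1.symm
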